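-- pv_equiv track=rewrite | github.com/joehz2007/pdf-convert | pdf_slicer/recognizer.py | _collapse_same_start_entries
-- ===== SOURCE A (Python) =====
-- def _collapse_same_start_entries(entries: list[tuple[str, int]]) -> list[tuple[str, int]]:
--     # 一级 TOC 常见“文档标题 + 第一章”同页并列，这里合并成一个用户可读标题。
--     collapsed: list[tuple[str, int]] = []
--     for title, start_page in entries:
--         if collapsed and collapsed[-1][1] == start_page:
--             previous_title, _ = collapsed[-1]
--             combined = previous_title if title in previous_title else f"{previous_title} + {title}"
--             collapsed[-1] = (combined, start_page)
--         else:
--             collapsed.append((title, start_page))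
--     return collapsed
-- ===== SOURCE B (Python) =====
-- def _collapse_same_start_entries(entries: list[tuple[str, int]]) -> list[tuple[str, int]]:
--     # Peel maximal runs of equal start_page; fold each run's titles into one combined title.
--     collapsed: list[tuple[str, int]] = []
--     i, n = 0, len(entries)
--     while i < n:
--         title, page = entries[i]
--         i += 1
--         while i < n and entries[i][1] == page:
--             t = entries[i][0]
--             if t not in title:
--                 title = f"{title} + {t}"
--             i += 1
--         collapsed.append((title, page))
--     return collapsed
-- ===== Notes on version B (the rewrite author's own statement) =====
-- stated objective: alternative
-- what changed: B replaces A's single pass that repeatedly re-reads and overwrites the last output element with a nested run-peeling loop: it consumes each maximal run of equal start_page with an inner loop folding the titles into one combined string, then emits one pair per run.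
import Mathlib
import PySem

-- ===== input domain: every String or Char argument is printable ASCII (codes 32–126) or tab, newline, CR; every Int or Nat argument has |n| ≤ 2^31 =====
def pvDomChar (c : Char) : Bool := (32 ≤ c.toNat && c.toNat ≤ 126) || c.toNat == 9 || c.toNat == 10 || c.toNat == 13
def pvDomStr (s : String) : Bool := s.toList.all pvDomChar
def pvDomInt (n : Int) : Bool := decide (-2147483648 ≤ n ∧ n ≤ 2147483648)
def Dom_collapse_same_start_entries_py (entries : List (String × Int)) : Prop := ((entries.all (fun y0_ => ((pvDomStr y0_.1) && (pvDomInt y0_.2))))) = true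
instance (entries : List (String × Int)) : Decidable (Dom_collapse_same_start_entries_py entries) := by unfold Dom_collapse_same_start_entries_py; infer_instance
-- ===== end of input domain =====

-- ===== PORT A =====
-- B replaces A's pass that overwrites the last output element with a run-peeling nested loop (alternative decomposition; same cost).
def pvStepA (collapsed : List (String × Int)) (e : String × Int) : List (String × Int) :=
  match collapsed.getLast? with
  | some (previous_title, pp) =>
      if pp = e.2 then
        collapsed.dropLast ++
          [(if PySem.Str.isIn e.1 previous_title then previous_title
            else previous_title ++ " + " ++ e.1, e.2)]
      else collapsed ++ [e]
  | none => collapsed ++ [e]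

def collapse_same_start_entries_py (entries : List (String × Int)) : List (String × Int) :=
  entries.foldl pvStepA []

-- ===== PORT B =====
-- inner `while` = the `p = page` branch (extend the run's title); outer-loop advance = the other branch (emit and start a new run)
def pvRunB (title : String) (page : Int) : List (String × Int) → List (String × Int)
  | [] => [(title, page)]
  | (t, p) :: rest =>
      if p = page then
        pvRunB (if PySem.Str.isIn t title then title else title ++ " + " ++ t) page rest
      else (title, page) :: pvRunB t p rest

def collapse_same_start_entries_py_alt (entries : List (String × Int)) : List (String × Int) :=
  match entries with
  | [] => []
  | (t, p) :: rest => pvRunB t p rest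

-- ===== PRECONDITION & SPEC =====
def Spec_collapse_same_start_entries_py (entries : List (String × Int)) (out : List (String × Int)) : Prop := out = collapse_same_start_entries_py_alt entries
instance (entries : List (String × Int)) (out : List (String × Int)) : Decidable (Spec_collapse_same_start_entries_py entries out) := by unfold Spec_collapse_same_start_entries_py; infer_instance

-- ===== CLAIM (what is proved, stated in full; the proofs are below) =====
def Claim_equal_collapse_same_start_entries_py : Prop := ∀ (entries : List (String × Int)), Dom_collapse_same_start_entries_py entries → Spec_collapse_same_start_entries_py entries (collapse_same_start_entries_py entries)

-- ===== LEMMAS AND PROOFS =====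
-- Loop invariant: once the output ends in (t, p), A's remaining fold equals the already-final prefix plus B's run-peeler on the rest.
lemma pvFoldl_step_eq_run (l : List (String × Int)) :
    ∀ (pre : List (String × Int)) (t : String) (p : Int),
      l.foldl pvStepA (pre ++ [(t, p)]) = pre ++ pvRunB t p l := by
  induction l with
  | nil => intro pre t p; simp [pvRunB]
  | cons e rest ih =>
      intro pre t p
      obtain ⟨t', p'⟩ := e
      by_cases h : p' = p
      · subst h
        rw [List.foldl_cons]
        have hstep : pvStepA (pre ++ [(t, p')]) (t', p')
            = pre ++ [((if PySem.Str.isIn t' t then t else t ++ " + " ++ t'), p')] := by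
          simp [pvStepA]
        rw [hstep, ih, pvRunB]
        simp
      · have hstep : pvStepA (pre ++ [(t, p)]) (t', p')
            = (pre ++ [(t, p)]) ++ [(t', p')] := by
          simp [pvStepA]
          omega
        calc ((t', p') :: rest).foldl pvStepA (pre ++ [(t, p)])
            = rest.foldl pvStepA ((pre ++ [(t, p)]) ++ [(t', p')]) := by
              rw [List.foldl_cons, hstep]
          _ = (pre ++ [(t, p)]) ++ pvRunB t' p' rest := ih _ _ _
          _ = pre ++ pvRunB t p ((t', p') :: rest) := by
              simp [pvRunB, h]

-- ===== VERDICT (by name: the statement is the Claim_ definition above) =====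
theorem collapse_same_start_entries_py_spec : Claim_equal_collapse_same_start_entries_py := by
  intro entries _
  unfold Spec_collapse_same_start_entries_py collapse_same_start_entries_py collapse_same_start_entries_py_alt
  match entries with
  | [] => rfl
  | (t, p) :: rest =>
      have h0 : pvStepA [] (t, p) = [(t, p)] := by simp [pvStepA]
      rw [List.foldl_cons, h0]
      simpa using pvFoldl_step_eq_run rest [] t p
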